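-- pv_equiv track=rewrite | github.com/fengzengfly/outlookEmailPlus | outlook_web/services/verification_extractor.py | _pick_preferred_link
-- ===== SOURCE A (Python) =====
-- from typing import Any, Dict, List, Optional
--
-- def _pick_preferred_link(links: List[str], prefer_link_keywords: List[str]) -> Optional[str]:
--     if not links:
--         return None
--
--     keywords = [k.lower() for k in (prefer_link_keywords or []) if k]
--     if keywords:
--         for keyword in keywords:
--             for link in links:
--                 if keyword in (link or "").lower():
--                     return link
--
--     return links[0]
-- ===== SOURCE B (Python) =====
-- from typing import List, Optional
--
-- def _pick_preferred_link(links: List[str], prefer_link_keywords: List[str]) -> Optional[str]: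
--     if not links:
--         return None
--     keywords = [k.lower() for k in (prefer_link_keywords or []) if k]
--     sentinel = len(keywords)
--     best, best_prio = links[0], sentinel
--     for link in links:
--         low = (link or "").lower()
--         prio = next((i for i, k in enumerate(keywords) if k in low), sentinel)
--         if prio < best_prio:
--             best, best_prio = link, prio
--     return best
-- ===== Notes on version B (the rewrite author's own statement) =====
-- stated objective: alternative
-- what changed: Single pass over the links computing each link's keyword-priority (index of the first matching keyword) and keeping the strict minimum, instead of A's nested keyword-outer/link-inner scan with early return.
import Mathlib
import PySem

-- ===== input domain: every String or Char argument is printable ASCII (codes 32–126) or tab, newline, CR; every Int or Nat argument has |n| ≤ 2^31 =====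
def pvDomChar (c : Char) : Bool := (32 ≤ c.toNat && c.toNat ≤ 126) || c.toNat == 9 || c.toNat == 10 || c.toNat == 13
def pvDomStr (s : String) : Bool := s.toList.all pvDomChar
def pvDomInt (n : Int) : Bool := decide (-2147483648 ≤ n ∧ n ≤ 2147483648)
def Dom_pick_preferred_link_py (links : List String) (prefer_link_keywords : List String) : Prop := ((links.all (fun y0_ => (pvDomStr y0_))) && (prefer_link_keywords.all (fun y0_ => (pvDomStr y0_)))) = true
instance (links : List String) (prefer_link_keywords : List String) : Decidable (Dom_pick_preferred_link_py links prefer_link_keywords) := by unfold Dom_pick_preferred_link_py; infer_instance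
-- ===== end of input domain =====

-- B replaces A's keyword-outer/link-inner nested scan with one pass over the links
-- keeping the link of strictly smallest keyword priority (objective: alternative).

-- ===== PORT A =====
-- inner 'for link in links' loop: first link whose lowercase form contains keyword
def pvFindLink (keyword : String) : List String → Option String
  | [] => none
  | l :: ls => if PySem.Str.isIn keyword (PySem.Str.lower l) then some l else pvFindLink keyword ls

-- outer 'for keyword in keywords' loop
def pvALoop (links : List String) : List String → Option String
  | [] => none
  | k :: rest =>
    match pvFindLink k links with
    | some l => some l
    | none => pvALoop links rest

def pick_preferred_link_py (links : List String) (prefer_link_keywords : List String) : Option String :=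
  match links with
  | [] => none
  | l0 :: _ =>
    let keywords := (prefer_link_keywords.filter (fun k => k ≠ "")).map PySem.Str.lower
    if keywords ≠ [] then
      match pvALoop links keywords with
      | some l => some l
      | none => some l0
    else some l0

-- ===== PORT B =====
-- priority of a lowered link: index of the first keyword it contains, else keywords.length
def pvPrio (low : String) : List String → Nat
  | [] => 0
  | k :: rest => if PySem.Str.isIn k low then 0 else 1 + pvPrio low rest

-- loop body of B's single pass: keep the strictly smaller priority
def pvStep (keywords : List String) (s : String × Nat) (link : String) : String × Nat :=
  let p := pvPrio (PySem.Str.lower link) keywords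
  if p < s.2 then (link, p) else s

def pick_preferred_link_py_alt (links : List String) (prefer_link_keywords : List String) : Option String :=
  match links with
  | [] => none
  | l0 :: _ =>
    let keywords := (prefer_link_keywords.filter (fun k => k ≠ "")).map PySem.Str.lower
    some (links.foldl (pvStep keywords) (l0, keywords.length)).1

-- ===== PRECONDITION & SPEC =====
def Spec_pick_preferred_link_py (links : List String) (prefer_link_keywords : List String) (out : Option String) : Prop := out = pick_preferred_link_py_alt links prefer_link_keywords
instance (links : List String) (prefer_link_keywords : List String) (out : Option String) : Decidable (Spec_pick_preferred_link_py links prefer_link_keywords out) := by unfold Spec_pick_preferred_link_py; infer_instance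

-- ===== CLAIM (what is proved, stated in full; the proofs are below) =====
def Claim_equal_pick_preferred_link_py : Prop := ∀ (links : List String) (prefer_link_keywords : List String), Dom_pick_preferred_link_py links prefer_link_keywords → Spec_pick_preferred_link_py links prefer_link_keywords (pick_preferred_link_py links prefer_link_keywords)

-- ===== LEMMAS AND PROOFS =====

-- minimal priority over a list of links (keywords.length if none matches)
def pvM (K : List String) : List String → Nat
  | [] => K.length
  | l :: ls => min (pvPrio (PySem.Str.lower l) K) (pvM K ls)

theorem pvPrio_le (low : String) (K : List String) : pvPrio low K ≤ K.length := by
  induction K with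
  | nil => simp [pvPrio]
  | cons k rest ih => simp only [pvPrio, List.length_cons]; split <;> omega

theorem pvM_le (K L : List String) : pvM K L ≤ K.length := by
  induction L with
  | nil => simp [pvM]
  | cons l ls ih => simp only [pvM]; have := pvPrio_le (PySem.Str.lower l) K; omega

theorem pvM_le_mem (K : List String) (L : List String) (w : String) (hw : w ∈ L) :
    pvM K L ≤ pvPrio (PySem.Str.lower w) K := by
  induction L with
  | nil => simp at hw
  | cons a as ih =>
    simp only [pvM]
    rcases List.mem_cons.mp hw with h | h
    · subst h; omega
    · have := ih h; omega

theorem pvM_exists (K : List String) (L : List String) (h : pvM K L < K.length) :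
    (L.find? (fun l => pvPrio (PySem.Str.lower l) K == pvM K L)).isSome := by
  induction L with
  | nil => simp [pvM] at h
  | cons l ls ih =>
    simp only [pvM] at h ⊢
    by_cases hl : pvPrio (PySem.Str.lower l) K ≤ pvM K ls
    · rw [List.find?_cons_of_pos]
      · simp
      · simp; omega
    · have hm : min (pvPrio (PySem.Str.lower l) K) (pvM K ls) = pvM K ls := by omega
      rw [hm] at h ⊢
      rw [List.find?_cons_of_neg]
      · exact ih h
      · simp; omega

theorem find?_congr_mem {α : Type} (L : List α) (p q : α → Bool)
    (h : ∀ a ∈ L, p a = q a) : L.find? p = L.find? q := by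
  induction L with
  | nil => rfl
  | cons a as ih =>
    by_cases hp : p a = true
    · rw [List.find?_cons_of_pos hp, List.find?_cons_of_pos ((h a List.mem_cons_self) ▸ hp)]
    · rw [List.find?_cons_of_neg hp, List.find?_cons_of_neg ((h a List.mem_cons_self) ▸ hp)]
      exact ih (fun x hx => h x (List.mem_cons_of_mem a hx))

theorem pvFindLink_eq_find? (k : String) (L : List String) :
    pvFindLink k L = L.find? (fun l => PySem.Str.isIn k (PySem.Str.lower l)) := by
  induction L with
  | nil => rfl
  | cons l ls ih =>
    simp only [pvFindLink, List.find?_cons]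
    cases h : PySem.Str.isIn k (PySem.Str.lower l)
    · simpa using ih
    · simp

-- characterization of B's fold
theorem fold_char (K : List String) (L : List String) (b0 : String) (p0 : Nat) (hp0 : p0 ≤ K.length) :
    L.foldl (pvStep K) (b0, p0) =
      if pvM K L < p0 then
        ((L.find? (fun l => pvPrio (PySem.Str.lower l) K == pvM K L)).getD b0, pvM K L)
      else (b0, p0) := by
  induction L generalizing b0 p0 with
  | nil =>
    have : ¬ pvM K [] < p0 := by simp [pvM]; omega
    simp [this]
  | cons l ls ih =>
    have hple : pvPrio (PySem.Str.lower l) K ≤ K.length := pvPrio_le _ _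
    have hmle : pvM K ls ≤ K.length := pvM_le _ _
    simp only [List.foldl_cons, pvStep, pvM]
    by_cases hlt : pvPrio (PySem.Str.lower l) K < p0
    · rw [if_pos hlt]
      rw [ih l _ hple]
      by_cases h2 : pvM K ls < pvPrio (PySem.Str.lower l) K
      · rw [if_pos h2]
        have hm : min (pvPrio (PySem.Str.lower l) K) (pvM K ls) = pvM K ls := by omega
        rw [hm, if_pos (by omega)]
        obtain ⟨w, hw⟩ := Option.isSome_iff_exists.mp (pvM_exists K ls (by omega))
        rw [List.find?_cons_of_neg (by simp; omega), hw]
        simp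
      · rw [if_neg h2]
        have hm : min (pvPrio (PySem.Str.lower l) K) (pvM K ls) = pvPrio (PySem.Str.lower l) K := by omega
        rw [hm, if_pos hlt]
        rw [List.find?_cons_of_pos (by simp)]
        simp
    · rw [if_neg hlt]
      rw [ih b0 p0 hp0]
      by_cases h2 : pvM K ls < p0
      · rw [if_pos h2]
        have hm : min (pvPrio (PySem.Str.lower l) K) (pvM K ls) = pvM K ls := by omega
        rw [hm, if_pos h2]
        rw [List.find?_cons_of_neg (by simp; omega)]
      · rw [if_neg h2]
        rw [if_neg (by omega)]

-- all links fail keyword k ⇒ priorities against (k :: rest) are shifted by one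
theorem pvM_shift (k : String) (rest : List String) (L : List String)
    (h : ∀ l ∈ L, PySem.Str.isIn k (PySem.Str.lower l) = false) :
    pvM (k :: rest) L = 1 + pvM rest L := by
  induction L with
  | nil => simp only [pvM, List.length_cons]; omega
  | cons l ls ih =>
    simp only [pvM, pvPrio, h l List.mem_cons_self,
      ih (fun x hx => h x (List.mem_cons_of_mem l hx))]
    simp only [Bool.false_eq_true, if_false]
    omega

theorem prio_eq_zero (k : String) (rest : List String) (a : String) :
    (pvPrio (PySem.Str.lower a) (k :: rest) == 0) = PySem.Str.isIn k (PySem.Str.lower a) := by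
  simp only [pvPrio]
  cases h : PySem.Str.isIn k (PySem.Str.lower a)
  · simp
  · simp

-- characterization of A's nested loops
theorem aloop_char (K : List String) (L : List String) :
    pvALoop L K =
      if pvM K L < K.length then
        L.find? (fun l => pvPrio (PySem.Str.lower l) K == pvM K L)
      else none := by
  induction K with
  | nil =>
    simp [pvALoop]
  | cons k rest ih =>
    simp only [pvALoop]
    rw [pvFindLink_eq_find?]
    by_cases hex : ∃ l ∈ L, PySem.Str.isIn k (PySem.Str.lower l) = true
    · obtain ⟨w, hw, hwin⟩ := hex
      have hfs : (L.find? (fun l => PySem.Str.isIn k (PySem.Str.lower l))).isSome := by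
        rw [List.find?_isSome]; exact ⟨w, hw, hwin⟩
      obtain ⟨v, hv⟩ := Option.isSome_iff_exists.mp hfs
      have hm0 : pvM (k :: rest) L = 0 := by
        have hle := pvM_le_mem (k :: rest) L w hw
        simp only [pvPrio, hwin, if_pos] at hle
        omega
      rw [hv, hm0]
      rw [if_pos (by simp)]
      rw [find?_congr_mem L _ _ (fun a _ => prio_eq_zero k rest a), hv]
    · have hall : ∀ l ∈ L, PySem.Str.isIn k (PySem.Str.lower l) = false := by
        intro l hl
        cases hb : PySem.Str.isIn k (PySem.Str.lower l)
        · rfl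
        · exact absurd ⟨l, hl, hb⟩ hex
      have hnone : L.find? (fun l => PySem.Str.isIn k (PySem.Str.lower l)) = none := by
        rw [List.find?_eq_none]
        intro x hx
        rw [hall x hx]
        exact Bool.false_ne_true
      rw [hnone]
      rw [pvM_shift k rest L hall, ih]
      simp only [List.length_cons]
      by_cases hc : pvM rest L < rest.length
      · rw [if_pos hc, if_pos (by omega)]
        apply find?_congr_mem
        intro a ha
        simp only [pvPrio, hall a ha]
        simp only [Bool.false_eq_true, if_false]
        have : (1 + pvPrio (PySem.Str.lower a) rest == 1 + pvM rest L)
             = (pvPrio (PySem.Str.lower a) rest == pvM rest L) := by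
          cases hb : (pvPrio (PySem.Str.lower a) rest == pvM rest L)
          · simp at hb ⊢; omega
          · simp at hb ⊢; omega
        exact this.symm
      · rw [if_neg hc, if_neg (by omega)]

-- ===== VERDICT (by name: the statement is the Claim_ definition above) =====
theorem pick_preferred_link_py_spec : Claim_equal_pick_preferred_link_py := by
  intro links prefer_link_keywords _
  unfold Spec_pick_preferred_link_py pick_preferred_link_py pick_preferred_link_py_alt
  match links with
  | [] => rfl
  | l0 :: rest =>
    simp only
    set K := (prefer_link_keywords.filter (fun k => k ≠ "")).map PySem.Str.lower with hK
    set L := l0 :: rest with hL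
    rw [fold_char K L l0 K.length (le_refl _), aloop_char K L]
    by_cases hlt : pvM K L < K.length
    · rw [if_pos hlt, if_pos hlt]
      obtain ⟨v, hv⟩ := Option.isSome_iff_exists.mp (pvM_exists K L hlt)
      rw [hv]
      have hKne : K ≠ [] := by
        intro h
        rw [h] at hlt
        simp at hlt
      rw [if_pos hKne]
      rfl
    · rw [if_neg hlt, if_neg hlt]
      split <;> rfl
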